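-- pv_equiv track=rewrite | github.com/A-Bergonzoli/AoC-2024 | day_20/p2.py | maybe_get_locations_after_cheat
-- ===== SOURCE A (Python) =====
-- from typing import Dict, Generator, KeysView, List, Optional, Tuple
--
-- def diamond_gen(cx: int, cy: int, n: int, m: int) -> Generator[Tuple[int, int], None, None]:
--     side_len = 41
--     half_diag = side_len // 2
--     for i in range(cx - half_diag, cx + half_diag + 1):
--         for j in range(cy - half_diag, cy + half_diag + 1):
--             if abs(cx - i) + abs(cy - j) <= half_diag and i in range(n) and j in range(m):
--                 yield (i, j)
--
-- def maybe_get_locations_after_cheat(grid: List[List[str]],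
--                                     x: int,
--                                     y: int,
--                                     path: KeysView[Tuple[int, int]]
-- ) -> Generator[Optional[Tuple[int, int]], None, None]:
--     n, m = len(grid), len(grid[0])
--     for nx, ny in diamond_gen(x, y, n, m):
--         if (nx, ny) in path:
--             yield nx, ny
--
--     return None
-- ===== SOURCE B (Python) =====
-- def maybe_get_locations_after_cheat(grid, x, y, path):
--     # Iterate over the path entries instead of scanning the 41x41 window;
--     # sort the survivors to reproduce the window's row-major yield order.
--     n, m = len(grid), len(grid[0])
--     keep = set()
--     for (px, py) in path:
--         if abs(px - x) + abs(py - y) <= 20 and 0 <= px < n and 0 <= py < m: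
--             keep.add((px, py))
--     return sorted(keep)
-- ===== Notes on version B (the rewrite author's own statement) =====
-- stated objective: alternative
-- what changed: Instead of scanning the fixed 41x41 diamond window in row-major order and testing membership in path, B filters the path entries themselves by Manhattan distance and grid bounds, deduplicates them in a set, and sorts the survivors to restore the row-major order.
import Mathlib
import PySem

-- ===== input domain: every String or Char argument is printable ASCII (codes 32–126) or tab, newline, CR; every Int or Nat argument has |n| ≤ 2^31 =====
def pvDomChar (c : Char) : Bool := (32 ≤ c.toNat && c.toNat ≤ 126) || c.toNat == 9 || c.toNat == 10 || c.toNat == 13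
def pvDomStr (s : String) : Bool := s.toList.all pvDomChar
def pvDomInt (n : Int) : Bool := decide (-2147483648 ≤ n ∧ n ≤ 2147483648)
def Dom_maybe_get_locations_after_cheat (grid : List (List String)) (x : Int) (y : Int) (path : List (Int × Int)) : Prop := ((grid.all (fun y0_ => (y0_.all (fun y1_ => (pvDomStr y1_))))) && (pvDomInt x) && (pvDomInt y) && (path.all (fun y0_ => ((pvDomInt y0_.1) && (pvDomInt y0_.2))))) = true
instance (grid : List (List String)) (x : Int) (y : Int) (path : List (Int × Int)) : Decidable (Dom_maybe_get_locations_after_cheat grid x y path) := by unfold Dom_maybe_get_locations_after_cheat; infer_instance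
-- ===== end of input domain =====

-- B replaces A's fixed 41×41 window scan by filtering the path entries themselves and
-- sorting the deduplicated survivors (objective: alternative decomposition, same results).

-- ===== PORT A =====
-- the two nested range loops of diamond_gen, yielding into an accumulator list;
-- 'i in range(n)' on an int i is exactly 0 ≤ i ∧ i < n
def diamond_gen (cx : Int) (cy : Int) (n : Int) (m : Int) : List (Int × Int) :=
  let side_len : Int := 41
  let half_diag : Int := PySem.Int.floordiv side_len 2
  (PySem.List.pyRange (cx - half_diag) (cx + half_diag + 1) 1).foldl (fun acc i =>
    (PySem.List.pyRange (cy - half_diag) (cy + half_diag + 1) 1).foldl (fun acc j =>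
      if |cx - i| + |cy - j| ≤ half_diag ∧ (0 ≤ i ∧ i < n) ∧ (0 ≤ j ∧ j < m) then
        acc ++ [(i, j)]
      else acc) acc) []

-- grid[0] raises IndexError on grid = []: that input is excluded by Pre_; pyGetD is exact elsewhere
def maybe_get_locations_after_cheat (grid : List (List String)) (x : Int) (y : Int) (path : List (Int × Int)) : List (Int × Int) :=
  let n : Int := grid.length
  let m : Int := (PySem.List.pyGetD grid 0 []).length
  (diamond_gen x y n m).foldl (fun acc nxy => if nxy ∈ path then acc ++ [nxy] else acc) []

-- ===== PORT B =====
def maybe_get_locations_after_cheat_alt (grid : List (List String)) (x : Int) (y : Int) (path : List (Int × Int)) : List (Int × Int) :=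
  let n : Int := grid.length
  let m : Int := (PySem.List.pyGetD grid 0 []).length
  let keep : PySem.Set (Int × Int) :=
    path.foldl (fun s p =>
      if |p.1 - x| + |p.2 - y| ≤ 20 ∧ (0 ≤ p.1 ∧ p.1 < n) ∧ (0 ≤ p.2 ∧ p.2 < m) then
        PySem.Set.add s p
      else s) PySem.Set.empty
  -- Python's sorted on tuples compares lexicographically: key into Lex (Int × Int), exactly that order
  PySem.List.sorted keep (fun p => (toLex p : Lex (Int × Int))) false

-- ===== PRECONDITION & SPEC =====
-- Pre_ excludes only grid = [], on which Python A raises IndexError at grid[0]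
def Pre_maybe_get_locations_after_cheat (grid : List (List String)) (x : Int) (y : Int) (path : List (Int × Int)) : Prop := grid ≠ []
instance (grid : List (List String)) (x : Int) (y : Int) (path : List (Int × Int)) : Decidable (Pre_maybe_get_locations_after_cheat grid x y path) := by unfold Pre_maybe_get_locations_after_cheat; infer_instance

def pvWitness_maybe_get_locations_after_cheat : List (List String) × Int × Int × (List (Int × Int)) := ([["."]], 0, 0, [(0, 0)])

def Spec_maybe_get_locations_after_cheat (grid : List (List String)) (x : Int) (y : Int) (path : List (Int × Int)) (out : List (Int × Int)) : Prop := out = maybe_get_locations_after_cheat_alt grid x y path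
instance (grid : List (List String)) (x : Int) (y : Int) (path : List (Int × Int)) (out : List (Int × Int)) : Decidable (Spec_maybe_get_locations_after_cheat grid x y path out) := by unfold Spec_maybe_get_locations_after_cheat; infer_instance

-- ===== CLAIM (what is proved, stated in full; the proofs are below) =====
def Claim_equal_maybe_get_locations_after_cheat : Prop := ∀ (grid : List (List String)) (x : Int) (y : Int) (path : List (Int × Int)), Dom_maybe_get_locations_after_cheat grid x y path → Pre_maybe_get_locations_after_cheat grid x y path → Spec_maybe_get_locations_after_cheat grid x y path (maybe_get_locations_after_cheat grid x y path)

-- ===== LEMMAS AND PROOFS =====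

-- a loop that folds f only on elements satisfying C is the fold of f over the filtered list
theorem pvFoldlIfFilter {α β : Type} (C : α → Prop) [DecidablePred C] (f : β → α → β)
    (l : List α) (init : β) :
    l.foldl (fun s p => if C p then f s p else s) init
      = (l.filter (fun p => decide (C p))).foldl f init := by
  induction l generalizing init with
  | nil => rfl
  | cons a l ih => by_cases h : C a <;> simp [List.filter_cons, h, ih]

-- the diamond scan, flattened into a flatMap of filtered ranges
theorem pvDiamondEq (cx cy n m : Int) :
    diamond_gen cx cy n m =
      (PySem.List.pyRange (cx - 20) (cx + 20 + 1) 1).flatMap (fun i =>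
        ((PySem.List.pyRange (cy - 20) (cy + 20 + 1) 1).filter
            (fun j => decide (|cx - i| + |cy - j| ≤ 20 ∧ (0 ≤ i ∧ i < n) ∧ (0 ≤ j ∧ j < m)))).map
          (fun j => (i, j))) := by
  have hfd : PySem.Int.floordiv 41 2 = 20 := by decide
  simp only [diamond_gen, hfd]
  have h1 : ∀ (i : Int) (acc : List (Int × Int)),
      (PySem.List.pyRange (cy - 20) (cy + 20 + 1) 1).foldl (fun acc j =>
          if |cx - i| + |cy - j| ≤ 20 ∧ (0 ≤ i ∧ i < n) ∧ (0 ≤ j ∧ j < m) then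
            acc ++ [(i, j)]
          else acc) acc
        = acc ++ ((PySem.List.pyRange (cy - 20) (cy + 20 + 1) 1).filter
            (fun j => decide (|cx - i| + |cy - j| ≤ 20 ∧ (0 ≤ i ∧ i < n) ∧ (0 ≤ j ∧ j < m)))).map
          (fun j => (i, j)) := by
    intro i acc
    rw [pvFoldlIfFilter _ (fun acc j => acc ++ [(i, j)]),
      PySem.List.foldl_append_singleton_eq_map]
  simp only [h1]
  rw [PySem.List.foldl_append_eq_flatMap]
  simp

-- A's result: the flattened diamond, filtered by membership in path
theorem pvAEq (grid : List (List String)) (x y : Int) (path : List (Int × Int)) :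
    maybe_get_locations_after_cheat grid x y path
      = (diamond_gen x y (grid.length : Int) ((PySem.List.pyGetD grid 0 []).length : Int)).filter
          (fun p => decide (p ∈ path)) := by
  simp only [maybe_get_locations_after_cheat]
  rw [pvFoldlIfFilter (fun p => p ∈ path) (fun acc p => acc ++ [p]),
    PySem.List.foldl_append_singleton_eq_map]
  simp

-- membership in A's result
theorem pvAMem (grid : List (List String)) (x y : Int) (path : List (Int × Int)) (p : Int × Int) :
    p ∈ maybe_get_locations_after_cheat grid x y path ↔
      (|p.1 - x| + |p.2 - y| ≤ 20 ∧ (0 ≤ p.1 ∧ p.1 < (grid.length : Int))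
        ∧ (0 ≤ p.2 ∧ p.2 < ((PySem.List.pyGetD grid 0 []).length : Int))) ∧ p ∈ path := by
  rw [pvAEq, pvDiamondEq]
  simp only [List.mem_filter, List.mem_flatMap, List.mem_map, List.mem_filter,
    PySem.List.mem_pyRange_one, decide_eq_true_eq]
  constructor
  · rintro ⟨⟨i, ⟨hi1, hi2⟩, j, ⟨⟨hj1, hj2⟩, hc⟩, rfl⟩, hp⟩
    refine ⟨?_, hp⟩
    simp only [Int.abs_eq_natAbs] at hc ⊢
    omega
  · rintro ⟨hc, hp⟩
    refine ⟨⟨p.1, ?_, p.2, ⟨⟨?_, ?_⟩, ?_⟩, rfl⟩, hp⟩ <;>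
      simp only [Int.abs_eq_natAbs] at hc ⊢ <;> omega

-- A's result is strictly increasing in the lexicographic order
theorem pvAPairwise (grid : List (List String)) (x y : Int) (path : List (Int × Int)) :
    (maybe_get_locations_after_cheat grid x y path).Pairwise
      (fun p q => (toLex p : Lex (Int × Int)) < toLex q) := by
  rw [pvAEq, pvDiamondEq]
  refine List.Pairwise.filter _ ?_
  rw [List.pairwise_flatMap]
  constructor
  · intro i _
    rw [List.pairwise_map]
    refine List.Pairwise.filter _ ?_
    refine (PySem.List.pairwise_lt_pyRange_one _ _).imp ?_
    intro a b hab
    simp [Prod.Lex.toLex_lt_toLex, hab]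
  · refine (PySem.List.pairwise_lt_pyRange_one _ _).imp ?_
    intro a b hab
    intro u hu v hv
    simp only [List.mem_map, List.mem_filter] at hu hv
    obtain ⟨ju, _, rfl⟩ := hu
    obtain ⟨jv, _, rfl⟩ := hv
    simp [Prod.Lex.toLex_lt_toLex, hab]

theorem pvANodup (grid : List (List String)) (x y : Int) (path : List (Int × Int)) :
    (maybe_get_locations_after_cheat grid x y path).Nodup := by
  refine (pvAPairwise grid x y path).imp ?_
  intro a b hab he
  subst he
  exact absurd hab (lt_irrefl _)

-- B's kept set: the deduplicated filtered path
theorem pvKeepEq (grid : List (List String)) (x y : Int) (path : List (Int × Int)) :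
    path.foldl (fun s p =>
        if |p.1 - x| + |p.2 - y| ≤ 20 ∧ (0 ≤ p.1 ∧ p.1 < (grid.length : Int))
            ∧ (0 ≤ p.2 ∧ p.2 < ((PySem.List.pyGetD grid 0 []).length : Int)) then
          PySem.Set.add s p
        else s) PySem.Set.empty
      = PySem.Set.ofList (path.filter (fun p =>
          decide (|p.1 - x| + |p.2 - y| ≤ 20 ∧ (0 ≤ p.1 ∧ p.1 < (grid.length : Int))
            ∧ (0 ≤ p.2 ∧ p.2 < ((PySem.List.pyGetD grid 0 []).length : Int))))) := by
  rw [PySem.Set.ofList_eq_foldl, List.foldl_filter]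
  rw [pvFoldlIfFilter _ PySem.Set.add, List.foldl_filter]
  rfl

-- ===== VERDICT (by name: the statement is the Claim_ definition above) =====
theorem maybe_get_locations_after_cheat_spec : Claim_equal_maybe_get_locations_after_cheat := by
  intro grid x y path _ _
  unfold Spec_maybe_get_locations_after_cheat maybe_get_locations_after_cheat_alt
  simp only [pvKeepEq]
  refine (PySem.List.sorted_eq_of_perm_of_pairwise_lt _ _ _ ?_ (pvAPairwise grid x y path)).symm
  rw [List.perm_ext_iff_of_nodup (pvANodup grid x y path) (PySem.Set.nodup_ofList _)]
  intro p
  rw [pvAMem, PySem.Set.mem_ofList, List.mem_filter, decide_eq_true_eq, and_comm]
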